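-- pv_equiv track=rewrite | github.com/generating-algorithms/generating-dpvc | export_branching_rules_to_html.py | generate_html_branches
-- ===== SOURCE A (Python) =====
-- def split(l, cnt):
--     ll = []
--     for e in l:
--         ll.append(e)
--         if len(ll) >= cnt:
--             yield ll
--             ll = []
--     if ll:
--         yield ll
--
-- generate_html_branches_cols = 3
--
-- def generate_html_branches(branches):
--     branches = sorted([sorted(b) for b in branches])
--
--     branches_len = (len(branches) + generate_html_branches_cols - 1) // generate_html_branches_cols * generate_html_branches_cols
--     branches = (branches + [[] for _ in range(generate_html_branches_cols)])[:branches_len]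
--
--     html_output = ''
--     for branches_row in split(branches, generate_html_branches_cols):
--         html_output += '<tr>'
--         for branch in branches_row:
--             html_output += '<td>{}</td>'.format(', '.join([str(b) for b in branch]))
--         html_output += '</tr>'
--
--     return html_output
-- ===== SOURCE B (Python) =====
-- def generate_html_branches(branches):
--     # single streaming pass: emit <tr>/<td> markup as cells are produced,
--     # closing the last partial row with empty cells; no padding list, no chunking
--     html = ''
--     i = 0
--     for b in sorted(sorted(b) for b in branches):
--         if i % 3 == 0:
--             html += '<tr>'
--         html += '<td>' + ', '.join(map(str, b)) + '</td>'
--         if i % 3 == 2: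
--             html += '</tr>'
--         i += 1
--     if i % 3:
--         html += '<td></td>' * (3 - i % 3) + '</tr>'
--     return html
-- ===== Notes on version B (the rewrite author's own statement) =====
-- stated objective: alternative
-- what changed: B makes one streaming pass over the sorted branches with a position counter, opening '<tr>' when the counter is 0 mod 3 and closing '</tr>' when it is 2 mod 3, then closes the final partial row with empty '<td></td>' cells; A instead pads the branch list with empty branches to a multiple of 3 and materialises rows via a split() generator before formatting.
import Mathlib
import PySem

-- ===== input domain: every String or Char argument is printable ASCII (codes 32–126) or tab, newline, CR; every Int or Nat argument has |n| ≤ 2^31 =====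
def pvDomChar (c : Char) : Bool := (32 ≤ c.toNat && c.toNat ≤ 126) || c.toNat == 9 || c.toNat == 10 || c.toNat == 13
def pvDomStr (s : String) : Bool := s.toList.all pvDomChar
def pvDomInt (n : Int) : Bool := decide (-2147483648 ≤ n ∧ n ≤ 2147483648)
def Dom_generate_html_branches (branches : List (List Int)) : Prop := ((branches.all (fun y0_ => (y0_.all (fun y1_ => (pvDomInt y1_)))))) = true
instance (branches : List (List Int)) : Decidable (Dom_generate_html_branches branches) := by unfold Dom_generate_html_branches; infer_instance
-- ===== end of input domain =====

-- B replaces A's pad-then-chunk construction (pad with empty branches, split() generator,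
-- row-by-row formatting) by ONE streaming pass with a position counter that opens/closes
-- <tr> tags on the fly and closes the last partial row with empty cells (objective: alternative).

-- ===== PORT A =====
def generate_html_branches_cols : Int := 3

-- the split() generator of A: accumulate ll, yield when len(ll) >= cnt, flush the remainder
def splitGen (cnt : Int) : List (List Int) → List (List Int) → List (List (List Int))
  | [], ll => if ll.isEmpty then [] else [ll]
  | e :: rest, ll =>
      if cnt ≤ (((ll ++ [e]).length : Int)) then (ll ++ [e]) :: splitGen cnt rest []
      else splitGen cnt rest (ll ++ [e])

def generate_html_branches (branches : List (List Int)) : String :=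
  let bs := PySem.List.sorted (branches.map (fun b => PySem.List.sorted b (fun x => x) false)) (fun x => x) false
  let branches_len := PySem.Int.floordiv ((bs.length : Int) + generate_html_branches_cols - 1) generate_html_branches_cols * generate_html_branches_cols
  let bs2 := PySem.List.slice (bs ++ (PySem.List.pyRange 0 generate_html_branches_cols 1).map (fun _ => ([] : List Int))) none (some branches_len)
  (splitGen generate_html_branches_cols bs2 []).foldl
    (fun h row =>
      (row.foldl (fun h2 branch =>
          h2 ++ ("<td>" ++ PySem.Str.join ", " (branch.map (fun b => PySem.Int.toStr b)) ++ "</td>"))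
        (h ++ "<tr>")) ++ "</tr>") ""

-- ===== PORT B =====
-- one loop iteration of B; the counter i only ever holds 0,1,2,… so Nat % matches Python %
def stepB (st : String × Nat) (b : List Int) : String × Nat :=
  let h1 := if st.2 % 3 = 0 then st.1 ++ "<tr>" else st.1
  let h2 := h1 ++ ("<td>" ++ PySem.Str.join ", " (b.map (fun x => PySem.Int.toStr x)) ++ "</td>")
  let h3 := if st.2 % 3 = 2 then h2 ++ "</tr>" else h2
  (h3, st.2 + 1)

-- Python's '<td></td>' * k for k ≥ 0, ported by hand (exact for the nonnegative k B uses)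
def repTd : Nat → String
  | 0 => ""
  | n + 1 => "<td></td>" ++ repTd n

-- B's final 'if i % 3:' block
def finishB (st : String × Nat) : String :=
  if st.2 % 3 ≠ 0 then st.1 ++ (repTd (3 - st.2 % 3) ++ "</tr>") else st.1

def generate_html_branches_alt (branches : List (List Int)) : String :=
  finishB ((PySem.List.sorted (branches.map (fun b => PySem.List.sorted b (fun x => x) false)) (fun x => x) false).foldl stepB ("", 0))

-- ===== PRECONDITION & SPEC =====
def Spec_generate_html_branches (branches : List (List Int)) (out : String) : Prop := out = generate_html_branches_alt branches
instance (branches : List (List Int)) (out : String) : Decidable (Spec_generate_html_branches branches out) := by unfold Spec_generate_html_branches; infer_instance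

-- ===== CLAIM (what is proved, stated in full; the proofs are below) =====
def Claim_equal_generate_html_branches : Prop := ∀ (branches : List (List Int)), Dom_generate_html_branches branches → Spec_generate_html_branches branches (generate_html_branches branches)

-- ===== LEMMAS AND PROOFS =====

theorem strJoin_nil (sep : String) : PySem.Str.join sep [] = "" := by
  simp [PySem.Str.join, PySem.Chars.join_nil]

theorem splitGen_cons3 (a b c : List Int) (rest : List (List Int)) :
    splitGen generate_html_branches_cols (a :: b :: c :: rest) []
      = [a, b, c] :: splitGen generate_html_branches_cols rest [] := by
  simp [splitGen, generate_html_branches_cols]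

theorem padA (bs : List (List Int)) :
    PySem.List.slice
      (bs ++ (PySem.List.pyRange 0 generate_html_branches_cols 1).map (fun _ => ([] : List Int))) none
      (some (PySem.Int.floordiv ((bs.length : Int) + generate_html_branches_cols - 1) generate_html_branches_cols
              * generate_html_branches_cols))
    = bs ++ List.replicate ((3 - bs.length % 3) % 3) [] := by
  have h3 : (PySem.List.pyRange 0 generate_html_branches_cols 1).map (fun _ => ([] : List Int))
      = List.replicate 3 [] := by decide
  have hfd : PySem.Int.floordiv ((bs.length : Int) + generate_html_branches_cols - 1) generate_html_branches_cols
      = ((bs.length : Int) + 2) / 3 := by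
    unfold generate_html_branches_cols
    rw [PySem.Int.floordiv_eq_ediv_of_pos (by norm_num)]
    omega
  rw [h3, hfd, PySem.List.slice_to _ (by unfold generate_html_branches_cols; positivity)]
  unfold generate_html_branches_cols
  have hd := Int.mul_ediv_add_emod ((bs.length : Int) + 2) 3
  have h1 : 0 ≤ ((bs.length : Int) + 2) % 3 := Int.emod_nonneg _ (by norm_num)
  have h2 : ((bs.length : Int) + 2) % 3 < 3 := Int.emod_lt_of_pos _ (by norm_num)
  have hk : (((bs.length : Int) + 2) / 3 * 3).toNat = bs.length + (3 - bs.length % 3) % 3 := by omega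
  rw [hk, List.take_append, List.take_of_length_le (by omega), List.take_replicate]
  congr 2
  omega

-- the crux: A's fold over the padded, chunked list equals B's streaming pass plus its finish
theorem mainEq (L : List (List Int)) (acc : String) (i : Nat) (hi : i % 3 = 0) :
    (splitGen generate_html_branches_cols (L ++ List.replicate ((3 - L.length % 3) % 3) []) []).foldl
      (fun h row =>
        (row.foldl (fun h2 branch =>
            h2 ++ ("<td>" ++ PySem.Str.join ", " (branch.map (fun b => PySem.Int.toStr b)) ++ "</td>"))
          (h ++ "<tr>")) ++ "</tr>") acc
    = finishB (L.foldl stepB (acc, i)) := by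
  match L with
  | [] =>
    simp [splitGen, finishB, hi]
  | [a] =>
    have hrep : (3 - ([a] : List (List Int)).length % 3) % 3 = 2 := by simp
    have h1 : (i + 1) % 3 = 1 := by omega
    rw [hrep]
    simp only [List.replicate, List.cons_append, List.nil_append, splitGen_cons3]
    simp [splitGen, stepB, finishB, hi, h1, strJoin_nil, repTd, String.append_assoc]
  | [a, b] =>
    have hrep : (3 - ([a, b] : List (List Int)).length % 3) % 3 = 1 := by simp
    have h1 : (i + 1) % 3 = 1 := by omega
    have h2 : (i + 1 + 1) % 3 = 2 := by omega
    rw [hrep]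
    simp only [List.replicate, List.cons_append, List.nil_append, splitGen_cons3]
    simp [splitGen, stepB, finishB, hi, h1, h2, strJoin_nil, repTd, String.append_assoc]
  | a :: b :: c :: rest =>
    have hrep : (3 - (a :: b :: c :: rest : List (List Int)).length % 3) % 3
        = (3 - rest.length % 3) % 3 := by simp; omega
    have h1 : (i + 1) % 3 = 1 := by omega
    have h2 : (i + 1 + 1) % 3 = 2 := by omega
    rw [hrep]
    simp only [List.cons_append, splitGen_cons3, List.foldl_cons]
    rw [mainEq rest _ (i + 1 + 1 + 1) (by omega)]
    simp [stepB, hi, h1, h2, String.append_assoc]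
termination_by L.length
decreasing_by simp; omega

-- ===== VERDICT (by name: the statement is the Claim_ definition above) =====
theorem generate_html_branches_spec : Claim_equal_generate_html_branches := by
  intro branches _
  unfold Spec_generate_html_branches generate_html_branches generate_html_branches_alt
  simp only []
  set s := PySem.List.sorted (branches.map (fun b => PySem.List.sorted b (fun x => x) false)) (fun x => x) false with hs
  rw [padA]
  exact mainEq s "" 0 rfl
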